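-- pv_equiv track=rewrite | github.com/marvcks/yarp | Enumerate-Reaction-Mapping-main/enumerate_reaction_mapping.py | mapping_key
-- ===== SOURCE A (Python) =====
-- def mapping_key(atom_mapping, reactant_ranks, product_ranks):
--     counts = {}
--     for react_idx, prod_idx in atom_mapping.items():
--         r_rank = reactant_ranks[react_idx]
--         p_rank = product_ranks[prod_idx]
--         counts.setdefault(r_rank, {})
--         counts[r_rank][p_rank] = counts[r_rank].get(p_rank, 0) + 1
--
--     key_parts = []
--     for r_rank in sorted(set(reactant_ranks)):
--         p_counts = counts.get(r_rank, {})
--         key_parts.append((r_rank, tuple(sorted(p_counts.items()))))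
--     return tuple(key_parts)
-- ===== SOURCE B (Python) =====
-- def _rle(xs):
--     # run-length encode a (sorted) list: [(value, run length), ...]
--     out = []
--     i, n = 0, len(xs)
--     while i < n:
--         p = xs[i]
--         c = 1
--         i += 1
--         while i < n and xs[i] == p:
--             c += 1
--             i += 1
--         out.append((p, c))
--     return out
--
--
-- def mapping_key(atom_mapping, reactant_ranks, product_ranks):
--     # Sort-based grouping: flatten the mapping to (r_rank, p_rank) pairs,
--     # sort them lexicographically, run-length encode each r-run, then merge
--     # with the sorted distinct reactant ranks by two pointers.
--     pairs = sorted((reactant_ranks[ri], product_ranks[pi])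
--                    for ri, pi in atom_mapping.items())
--     groups = []
--     i, n = 0, len(pairs)
--     while i < n:
--         r = pairs[i][0]
--         run = []
--         while i < n and pairs[i][0] == r:
--             run.append(pairs[i][1])
--             i += 1
--         groups.append((r, tuple(_rle(run))))
--     out = []
--     gi = 0
--     for r in sorted(set(reactant_ranks)):
--         while gi < len(groups) and groups[gi][0] < r:
--             gi += 1
--         if gi < len(groups) and groups[gi][0] == r:
--             out.append((r, groups[gi][1]))
--         else:
--             out.append((r, ()))
--     return tuple(out)
-- ===== Notes on version B (the rewrite author's own statement) =====
-- stated objective: alternative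
-- what changed: Replaces A's hash-based accumulation (nested dict of counters followed by per-rank sorted(items)) by sort-based grouping: flatten to (r_rank, p_rank) pairs, sort once, run-length encode each r-run, and merge the groups with the sorted distinct reactant ranks by two pointers.
import Mathlib
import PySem

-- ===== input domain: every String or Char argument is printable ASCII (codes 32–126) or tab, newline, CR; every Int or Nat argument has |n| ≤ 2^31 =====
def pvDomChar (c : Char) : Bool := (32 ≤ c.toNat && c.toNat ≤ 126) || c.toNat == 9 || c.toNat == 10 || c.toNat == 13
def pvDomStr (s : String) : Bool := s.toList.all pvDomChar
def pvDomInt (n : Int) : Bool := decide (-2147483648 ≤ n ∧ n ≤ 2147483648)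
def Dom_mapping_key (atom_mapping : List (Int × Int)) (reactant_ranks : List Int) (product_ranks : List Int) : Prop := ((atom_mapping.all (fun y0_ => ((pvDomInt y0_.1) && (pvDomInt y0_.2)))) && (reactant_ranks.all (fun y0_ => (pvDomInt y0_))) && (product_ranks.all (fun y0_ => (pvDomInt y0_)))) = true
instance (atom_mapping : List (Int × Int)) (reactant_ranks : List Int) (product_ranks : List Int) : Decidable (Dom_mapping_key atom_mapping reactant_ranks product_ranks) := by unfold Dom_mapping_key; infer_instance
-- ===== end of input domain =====

-- B replaces A's hash accumulation (nested dict of counters + per-rank sorted items)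
-- by sort-based grouping: sort the (r_rank, p_rank) pairs once, run-length encode the
-- runs, and merge with the sorted distinct reactant ranks by two pointers (alternative).

-- ===== PORT A =====
-- A-side helper: the body of A's accumulation loop (counts.setdefault then nested increment)
def mkStep (reactant_ranks product_ranks : List Int)
    (counts : PySem.Dict Int (PySem.Dict Int Int)) (q : Int × Int) :
    PySem.Dict Int (PySem.Dict Int Int) :=
  let r_rank := PySem.List.pyGetD reactant_ranks q.1 0
  let p_rank := PySem.List.pyGetD product_ranks q.2 0
  let counts := counts.setdefault r_rank PySem.Dict.empty
  counts.insert r_rank ((counts.getD r_rank PySem.Dict.empty).insert p_rank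
    ((counts.getD r_rank PySem.Dict.empty).getD p_rank 0 + 1))

def mapping_key (atom_mapping : List (Int × Int)) (reactant_ranks : List Int) (product_ranks : List Int) : List (Int × (List (Int × Int))) :=
  let counts := atom_mapping.foldl (mkStep reactant_ranks product_ranks) PySem.Dict.empty
  (PySem.List.sorted (PySem.Set.ofList reactant_ranks) (fun x => x) false).foldl
    (fun key_parts r_rank =>
      key_parts ++ [(r_rank,
        PySem.List.sorted2 (counts.getD r_rank PySem.Dict.empty).items (fun p => p.1) (fun p => p.2) false)])
    []

-- ===== PORT B =====
-- B-side helper: _rle — run-length encode a (sorted) list of ints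
def runLen : List Int → List (Int × Int)
  | [] => []
  | p :: rest =>
      (p, 1 + ((rest.takeWhile (fun q => q == p)).length : Int)) ::
        runLen (rest.dropWhile (fun q => q == p))
  termination_by l => l.length
  decreasing_by have := List.length_dropWhile_le (fun q => q == p) rest; simp; omega

-- B-side helper: the outer while loop — group the sorted pairs into r-runs, RLE each run's p's
def groupRuns : List (Int × Int) → List (Int × List (Int × Int))
  | [] => []
  | (r, p) :: rest =>
      (r, runLen (p :: (rest.takeWhile (fun q => q.1 == r)).map (fun q => q.2))) ::
        groupRuns (rest.dropWhile (fun q => q.1 == r))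
  termination_by l => l.length
  decreasing_by have := List.length_dropWhile_le (fun q => q.1 == r) rest; simp; omega

-- B-side helper: the two-pointer merge of sorted distinct ranks with the sorted groups
def mergeRanks : List Int → List (Int × List (Int × Int)) → List (Int × List (Int × Int))
  | [], _ => []
  | r :: rs, gs =>
      let gs' := gs.dropWhile (fun g => decide (g.1 < r))
      (r, match gs' with
          | g :: _ => if g.1 == r then g.2 else []
          | [] => []) :: mergeRanks rs gs'

def mapping_key_alt (atom_mapping : List (Int × Int)) (reactant_ranks : List Int) (product_ranks : List Int) : List (Int × (List (Int × Int))) :=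
  let pairs := atom_mapping.map (fun q =>
    (PySem.List.pyGetD reactant_ranks q.1 0, PySem.List.pyGetD product_ranks q.2 0))
  let sp := PySem.List.sorted2 pairs (fun q => q.1) (fun q => q.2) false
  mergeRanks (PySem.List.sorted (PySem.Set.ofList reactant_ranks) (fun x => x) false) (groupRuns sp)

-- ===== PRECONDITION & SPEC =====
-- Pre_ excludes exactly the inputs on which Python A raises IndexError: some mapped index out of range of reactant_ranks/product_ranks.
def Pre_mapping_key (atom_mapping : List (Int × Int)) (reactant_ranks : List Int) (product_ranks : List Int) : Prop :=
  ∀ q ∈ atom_mapping, PySem.Raise.InRange reactant_ranks.length q.1 ∧ PySem.Raise.InRange product_ranks.length q.2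
instance (atom_mapping : List (Int × Int)) (reactant_ranks : List Int) (product_ranks : List Int) : Decidable (Pre_mapping_key atom_mapping reactant_ranks product_ranks) := by unfold Pre_mapping_key; infer_instance

def pvWitness_mapping_key : (List (Int × Int)) × List Int × List Int := ([(0, 0), (1, -1)], [5, 5], [7, 8])

def Spec_mapping_key (atom_mapping : List (Int × Int)) (reactant_ranks : List Int) (product_ranks : List Int) (out : List (Int × (List (Int × Int)))) : Prop := out = mapping_key_alt atom_mapping reactant_ranks product_ranks
instance (atom_mapping : List (Int × Int)) (reactant_ranks : List Int) (product_ranks : List Int) (out : List (Int × (List (Int × Int)))) : Decidable (Spec_mapping_key atom_mapping reactant_ranks product_ranks out) := by unfold Spec_mapping_key; infer_instance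

-- ===== CLAIM (what is proved, stated in full; the proofs are below) =====
def Claim_equal_mapping_key : Prop := ∀ (atom_mapping : List (Int × Int)) (reactant_ranks : List Int) (product_ranks : List Int), Dom_mapping_key atom_mapping reactant_ranks product_ranks → Pre_mapping_key atom_mapping reactant_ranks product_ranks → Spec_mapping_key atom_mapping reactant_ranks product_ranks (mapping_key atom_mapping reactant_ranks product_ranks)

-- ===== LEMMAS AND PROOFS =====

-- ---------- A-side characterisation (dict accumulator → map over sorted distinct ranks) ----------

theorem insertBy_congr {α : Type} (b1 b2 : α → α → Bool) (x : α) (ys : List α)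
    (h : ∀ y ∈ ys, b1 x y = b2 x y) :
    PySem.List.insertBy b1 x ys = PySem.List.insertBy b2 x ys := by
  induction ys with
  | nil => rfl
  | cons y ys ih =>
    simp only [PySem.List.insertBy]
    rw [h y (by simp)]
    by_cases hb : b2 x y = true
    · simp [hb]
    · simp only [Bool.not_eq_true] at hb
      simp [hb, ih (fun z hz => h z (by simp [hz]))]

theorem foldl_insertBy_congr {α : Type} (b1 b2 : α → α → Bool) :
    ∀ (xs acc : List α), (∀ a ∈ xs, ∀ b ∈ acc, b1 a b = b2 a b) →
    (∀ a ∈ xs, ∀ b ∈ xs, b1 a b = b2 a b) →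
    xs.foldl (fun acc x => PySem.List.insertBy b1 x acc) acc
      = xs.foldl (fun acc x => PySem.List.insertBy b2 x acc) acc := by
  intro xs
  induction xs with
  | nil => intro acc _ _; rfl
  | cons x xs ih =>
    intro acc hacc hxs
    simp only [List.foldl_cons]
    rw [insertBy_congr b1 b2 x acc (fun y hy => hacc x (by simp) y hy)]
    exact ih (PySem.List.insertBy b2 x acc)
      (fun a ha b hb => by
        rcases (PySem.List.mem_insertBy _ _ _ _).mp hb with hb | hb
        · subst hb; exact hxs a (by simp [ha]) b (by simp)
        · exact hacc a (by simp [ha]) b hb)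
      (fun a ha b hb => hxs a (by simp [ha]) b (by simp [hb]))

-- sorted with a lexicographic tuple key equals the strictly-k1-increasing rearrangement
theorem sorted2_eq_of_perm_of_pairwise_lt {α : Type} (xs ys : List α) (k1 k2 : α → Int)
    (hperm : ys.Perm xs) (hpw : ys.Pairwise (fun a b => k1 a < k1 b)) :
    PySem.List.sorted2 xs k1 k2 false = ys := by
  have hkey : ∀ a ∈ xs, ∀ b ∈ xs,
      (decide (k1 a < k1 b) || (!decide (k1 b < k1 a) && decide (k2 a < k2 b)))
        = decide (k1 a < k1 b) := by
    intro a ha b hb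
    rcases lt_trichotomy (k1 a) (k1 b) with h | h | h
    · simp [h, not_lt.mpr (le_of_lt h)]
    · have hne : ∀ u ∈ ys, ∀ v ∈ ys, u ≠ v → k1 u ≠ k1 v := by
        intro u hu v hv huv
        have := List.Pairwise.imp (fun {u v} (h : k1 u < k1 v) => ne_of_lt h) hpw
        exact List.Pairwise.forall (fun u v h => (h ∘ Eq.symm : k1 v ≠ k1 u)) this hu hv huv
      have hab : a = b := by
        by_contra hne'
        exact hne a (hperm.mem_iff.mpr ha) b (hperm.mem_iff.mpr hb) hne' h
      subst hab
      simp
    · simp [h, not_lt.mpr (le_of_lt h)]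
  have : PySem.List.sorted2 xs k1 k2 false = PySem.List.sorted xs k1 false := by
    rw [PySem.List.sorted_eq_foldl_insertBy]
    unfold PySem.List.sorted2
    exact foldl_insertBy_congr _ _ xs [] (by simp) hkey
  rw [this]
  exact PySem.List.sorted_eq_of_perm_of_pairwise_lt xs ys k1 hperm hpw

theorem getD_setdefault_ne {κ ν : Type} [BEq κ] [LawfulBEq κ]
    (d : PySem.Dict κ ν) (k k' : κ) (v d0 : ν) (h : k' ≠ k) :
    (d.setdefault k v).getD k' d0 = d.getD k' d0 := by
  rw [PySem.Dict.getD_eq_get?_getD, PySem.Dict.get?_setdefault_of_ne d v h,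
    ← PySem.Dict.getD_eq_get?_getD]

-- the inner dict of A's accumulator at key r is the counting fold over the p-ranks whose r-rank is r
theorem getD_foldA (rr pr : List Int) (r : Int) :
    ∀ (l : List (Int × Int)) (d : PySem.Dict Int (PySem.Dict Int Int)),
    (l.foldl (mkStep rr pr) d).getD r PySem.Dict.empty
      = ((((l.map (fun q => (PySem.List.pyGetD rr q.1 0, PySem.List.pyGetD pr q.2 0))).filter
            (fun q => q.1 == r)).map (fun q => q.2)).foldl
          (fun dd p => dd.insert p (dd.getD p 0 + 1)) (d.getD r PySem.Dict.empty)) := by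
  intro l
  induction l with
  | nil => intro d; rfl
  | cons q l ih =>
    intro d
    simp only [List.foldl_cons, List.map_cons, List.filter_cons]
    rw [ih]
    by_cases hr : PySem.List.pyGetD rr q.1 0 = r
    · have hstep : (mkStep rr pr d q).getD r PySem.Dict.empty
          = (d.getD r PySem.Dict.empty).insert (PySem.List.pyGetD pr q.2 0)
              ((d.getD r PySem.Dict.empty).getD (PySem.List.pyGetD pr q.2 0) 0 + 1) := by
        unfold mkStep
        rw [← hr]
        simp [PySem.Dict.getD_insert_self, PySem.Dict.getD_setdefault_self]
      simp [hr, hstep]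
    · have hstep : (mkStep rr pr d q).getD r PySem.Dict.empty = d.getD r PySem.Dict.empty := by
        unfold mkStep
        rw [PySem.Dict.getD_insert_of_ne _ _ _ (fun h => hr h.symm),
          getD_setdefault_ne _ _ _ _ _ (fun h => hr h.symm)]
      simp [hr, hstep]

theorem count_filter_map (r p : Int) :
    ∀ (l : List (Int × Int)), ((l.filter (fun q => q.1 == r)).map (fun q => q.2)).count p
      = l.count (r, p) := by
  intro l
  induction l with
  | nil => rfl
  | cons q l ih =>
    rcases q with ⟨a, b⟩
    by_cases ha : a = r
    · subst ha
      by_cases hb : b = p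
      · subst hb; simp [ih]
      · simp [ih, hb, Prod.ext_iff]
    · simp [ih, ha, Prod.ext_iff]

-- the per-rank entry of A equals the sorted distinct p-ranks with their pair counts
theorem per_rank (am : List (Int × Int)) (rr pr : List Int) (r : Int) :
    PySem.List.sorted2
      ((am.foldl (mkStep rr pr) PySem.Dict.empty).getD r PySem.Dict.empty).items
      (fun p => p.1) (fun p => p.2) false
    = (PySem.List.sorted (PySem.Set.ofList
        (((am.map (fun q => (PySem.List.pyGetD rr q.1 0, PySem.List.pyGetD pr q.2 0))).filter
          (fun q => q.1 == r)).map (fun q => q.2))) (fun x => x) false).map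
        (fun p => (p, ((am.map (fun q => (PySem.List.pyGetD rr q.1 0, PySem.List.pyGetD pr q.2 0))).count (r, p) : Int))) := by
  set ps := ((am.map (fun q => (PySem.List.pyGetD rr q.1 0, PySem.List.pyGetD pr q.2 0))).filter
      (fun q => q.1 == r)).map (fun q => q.2) with hps
  have h1 : (am.foldl (mkStep rr pr) PySem.Dict.empty).getD r PySem.Dict.empty
      = PySem.Dict.counter ps := by
    rw [getD_foldA]
    simp only [PySem.Dict.getD_empty]
    rw [PySem.Dict.foldl_insert_getD_add_one_eq_counter]
  rw [h1, PySem.Dict.items_counter]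
  have hfun : (fun p => (p, ((am.map (fun q => (PySem.List.pyGetD rr q.1 0, PySem.List.pyGetD pr q.2 0))).count (r, p) : Int)))
      = (fun k => (k, (ps.count k : Int))) := by
    funext k
    rw [hps, count_filter_map]
  rw [hfun]
  apply sorted2_eq_of_perm_of_pairwise_lt
  · exact List.Perm.map _ (PySem.List.sorted_perm _ _ _)
  · exact List.Pairwise.map _ (fun a b h => h) (PySem.List.sorted_ofList_pairwise_lt (xs := ps))

-- ---------- B-side: the lexicographic sort is Pairwise lex-≤ ----------

def pvBlt (a c : Int × Int) : Bool :=
  decide (a.1 < c.1) || (!decide (c.1 < a.1) && decide (a.2 < c.2))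

def pvLexLe (a c : Int × Int) : Prop := a.1 < c.1 ∨ (a.1 = c.1 ∧ a.2 ≤ c.2)

theorem pvBlt_iff (a c : Int × Int) : pvBlt a c = true ↔ (a.1 < c.1 ∨ (a.1 = c.1 ∧ a.2 < c.2)) := by
  simp only [pvBlt, Bool.or_eq_true, Bool.and_eq_true, Bool.not_eq_true',
    decide_eq_true_eq, decide_eq_false_iff_not]
  omega

theorem pvBlt_false_iff (a c : Int × Int) : pvBlt a c = false ↔ pvLexLe c a := by
  rw [← Bool.not_eq_true, pvBlt_iff]
  unfold pvLexLe
  omega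

theorem pairwise_insertBy_pvBlt (x : Int × Int) :
    ∀ (ys : List (Int × Int)), ys.Pairwise (fun a c => pvBlt c a = false) →
    (PySem.List.insertBy pvBlt x ys).Pairwise (fun a c => pvBlt c a = false) := by
  intro ys
  induction ys with
  | nil => intro _; simp [PySem.List.insertBy]
  | cons y ys ih =>
    intro h
    simp only [PySem.List.insertBy]
    by_cases hb : pvBlt x y = true
    · simp only [hb, if_true]
      refine List.Pairwise.cons ?_ h
      intro z hz
      rcases List.mem_cons.mp hz with hz | hz
      · subst hz
        rw [pvBlt_false_iff]
        rw [pvBlt_iff] at hb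
        unfold pvLexLe; omega
      · have hyz : pvBlt z y = false := (List.pairwise_cons.mp h).1 z hz
        rw [pvBlt_false_iff] at hyz ⊢
        rw [pvBlt_iff] at hb
        unfold pvLexLe at hyz ⊢; omega
    · simp only [hb]
      rw [Bool.not_eq_true] at hb
      refine List.Pairwise.cons ?_ (ih (List.pairwise_cons.mp h).2)
      intro z hz
      rcases (PySem.List.mem_insertBy _ _ _ _).mp hz with hz | hz
      · subst hz; exact hb
      · exact (List.pairwise_cons.mp h).1 z hz

theorem foldl_insertBy_pvBlt_pairwise :
    ∀ (xs acc : List (Int × Int)), acc.Pairwise (fun a c => pvBlt c a = false) →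
    (xs.foldl (fun acc x => PySem.List.insertBy pvBlt x acc) acc).Pairwise
      (fun a c => pvBlt c a = false) := by
  intro xs
  induction xs with
  | nil => intro acc h; exact h
  | cons x xs ih =>
    intro acc h
    exact ih _ (pairwise_insertBy_pvBlt x acc h)

theorem sorted2_pairwise_lex (xs : List (Int × Int)) :
    (PySem.List.sorted2 xs (fun q => q.1) (fun q => q.2) false).Pairwise pvLexLe := by
  have h : PySem.List.sorted2 xs (fun q => q.1) (fun q => q.2) false
      = xs.foldl (fun acc x => PySem.List.insertBy pvBlt x acc) [] := rfl
  rw [h]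
  exact (foldl_insertBy_pvBlt_pairwise xs [] (by simp)).imp
    (fun {a c} hac => (pvBlt_false_iff c a).mp hac)

-- ---------- generic: takeWhile/dropWhile on a monotone predicate are filters ----------

theorem takeWhile_eq_filter_of_mono {α : Type} (p : α → Bool) :
    ∀ (l : List α), l.Pairwise (fun a b => p a = false → p b = false) →
    l.takeWhile p = l.filter p ∧ l.dropWhile p = l.filter (fun a => !p a) := by
  intro l
  induction l with
  | nil => intro _; exact ⟨rfl, rfl⟩
  | cons x l ih =>
    intro h
    by_cases hx : p x = true
    · have := ih (List.pairwise_cons.mp h).2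
      simp [hx, this.1, this.2]
    · rw [Bool.not_eq_true] at hx
      have hall : ∀ a ∈ l, p a = false := fun a ha => (List.pairwise_cons.mp h).1 a ha hx
      constructor
      · simp only [List.takeWhile_cons, hx, List.filter_cons]
        rw [List.filter_eq_nil_iff.mpr (fun a ha => by simp [hall a ha])]
        simp
      · simp only [List.dropWhile_cons, hx, List.filter_cons, Bool.false_eq_true, if_false,
          Bool.not_false, if_true]
        rw [List.filter_eq_self.mpr (fun a ha => by simp [hall a ha])]

-- ---------- runLen on a sorted list = sorted distinct values with counts ----------

-- sorted(set(l)) is invariant under permutation of l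
theorem sorted_set_perm {l l' : List Int} (h : l.Perm l') :
    PySem.List.sorted (PySem.Set.ofList l) (fun x => x) false
      = PySem.List.sorted (PySem.Set.ofList l') (fun x => x) false := by
  apply PySem.List.sorted_eq_of_perm_of_pairwise_lt
  · rw [List.perm_ext_iff_of_nodup
      ((PySem.List.sorted_perm (PySem.Set.ofList l') (fun x => x) false).nodup_iff.mpr
        (PySem.Set.nodup_ofList l'))
      (PySem.Set.nodup_ofList l)]
    intro a
    rw [PySem.List.mem_sorted, PySem.Set.mem_ofList, PySem.Set.mem_ofList, h.mem_iff]
  · exact PySem.List.sorted_ofList_pairwise_lt l'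

-- peel the minimum off sorted(set(p :: rest)) when p is a lower bound
theorem sorted_set_cons_min (p : Int) (rest rest' : List Int)
    (hperm : ∀ a, a ∈ rest' ↔ a ∈ rest ∧ a ≠ p)
    (hlb : ∀ a ∈ rest, p ≤ a) :
    PySem.List.sorted (PySem.Set.ofList (p :: rest)) (fun x => x) false
      = p :: PySem.List.sorted (PySem.Set.ofList rest') (fun x => x) false := by
  apply PySem.List.sorted_eq_of_perm_of_pairwise_lt
  · have hnd : (p :: PySem.List.sorted (PySem.Set.ofList rest') (fun x => x) false).Nodup := by
      refine List.Nodup.cons ?_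
        ((PySem.List.sorted_perm (PySem.Set.ofList rest') (fun x => x) false).nodup_iff.mpr
          (PySem.Set.nodup_ofList rest'))
      intro hp
      rw [PySem.List.mem_sorted, PySem.Set.mem_ofList, hperm] at hp
      exact hp.2 rfl
    rw [List.perm_ext_iff_of_nodup hnd (PySem.Set.nodup_ofList _)]
    intro a
    simp only [List.mem_cons, PySem.List.mem_sorted, PySem.Set.mem_ofList, hperm]
    constructor
    · rintro (rfl | ⟨ha, _⟩)
      · exact .inl rfl
      · exact .inr ha
    · rintro (rfl | ha)
      · exact .inl rfl
      · by_cases hap : a = p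
        · exact .inl hap
        · exact .inr ⟨ha, hap⟩
  · refine List.Pairwise.cons ?_ (PySem.List.sorted_ofList_pairwise_lt rest')
    intro a ha
    rw [PySem.List.mem_sorted, PySem.Set.mem_ofList, hperm] at ha
    exact lt_of_le_of_ne (hlb a ha.1) (Ne.symm ha.2)

theorem runLen_sorted_eq :
    ∀ (n : Nat) (l : List Int), l.length ≤ n → l.Pairwise (· ≤ ·) →
    runLen l = (PySem.List.sorted (PySem.Set.ofList l) (fun x => x) false).map
      (fun p => (p, (l.count p : Int))) := by
  intro n
  induction n with
  | zero =>
    intro l hl _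
    rw [List.length_eq_zero_iff.mp (Nat.le_zero.mp hl)]
    simp [runLen, PySem.List.sorted_eq_nil_iff]
  | succ n ih =>
    intro l hl hpw
    match l with
    | [] => simp [runLen, PySem.List.sorted_eq_nil_iff]
    | p :: rest =>
      have hmono : rest.Pairwise (fun a b => (a == p) = false → (b == p) = false) := by
        refine List.Pairwise.imp_of_mem ?_ (List.pairwise_cons.mp hpw).2
        intro a b ha hb hab
        have hpa : p ≤ a := (List.pairwise_cons.mp hpw).1 a ha
        simp only [beq_eq_false_iff_ne, ne_eq]
        intro hane; omega
      obtain ⟨htw, hdw⟩ := takeWhile_eq_filter_of_mono (fun q => q == p) rest hmono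
      have hsub : (rest.filter (fun a => !(a == p))).Sublist rest := List.filter_sublist
      have hrec := ih (rest.filter (fun a => !(a == p)))
        (le_trans (List.Sublist.length_le hsub) (by simpa using Nat.lt_succ_iff.mp (Nat.lt_of_lt_of_le (Nat.lt_succ_of_le (le_refl _)) hl)))
        (List.Pairwise.sublist hsub (List.pairwise_cons.mp hpw).2)
      rw [runLen, htw, hdw, hrec]
      have hset : PySem.List.sorted (PySem.Set.ofList (p :: rest)) (fun x => x) false
          = p :: PySem.List.sorted (PySem.Set.ofList (rest.filter (fun a => !(a == p)))) (fun x => x) false := by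
        apply sorted_set_cons_min
        · intro a; simp [List.mem_filter]
        · exact (List.pairwise_cons.mp hpw).1
      rw [hset, List.map_cons]
      congr 1
      · -- head entry: the count of p
        have hcnt : (p :: rest).count p = 1 + (rest.filter (fun q => q == p)).length := by
          rw [List.count_cons_self, List.count_eq_length_filter]
          omega
        rw [hcnt]
        push_cast
        ring_nf
      · -- tail: counts of q ≠ p agree between rest-filter and p :: rest
        apply List.map_congr_left
        intro a ha
        have hane : a ≠ p ∧ a ∈ rest := by
          rw [PySem.List.mem_sorted, PySem.Set.mem_ofList, List.mem_filter] at ha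
          refine ⟨by simpa using ha.2, ha.1⟩
        congr 1
        have hdecomp := (List.filter_append_perm (fun q => q == p) rest).count_eq a
        rw [List.count_append] at hdecomp
        have hz : (rest.filter (fun q => q == p)).count a = 0 := by
          rw [List.count_eq_zero]
          intro hmem
          exact hane.1 (by simpa using List.mem_filter.mp hmem |>.2)
        have : (p :: rest).count a = rest.count a := by
          simp [Ne.symm hane.1]
        omega

-- ---------- groupRuns on a lex-sorted pair list ----------

theorem groupRuns_sorted_eq :
    ∀ (n : Nat) (l : List (Int × Int)), l.length ≤ n → l.Pairwise pvLexLe →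
    groupRuns l = (PySem.List.sorted (PySem.Set.ofList (l.map (fun q => q.1))) (fun x => x) false).map
      (fun r => (r, runLen ((l.filter (fun q => q.1 == r)).map (fun q => q.2)))) := by
  intro n
  induction n with
  | zero =>
    intro l hl _
    rw [List.length_eq_zero_iff.mp (Nat.le_zero.mp hl)]
    simp [groupRuns, PySem.List.sorted_eq_nil_iff]
  | succ n ih =>
    intro l hl hpw
    match l with
    | [] => simp [groupRuns, PySem.List.sorted_eq_nil_iff]
    | (r, p) :: rest =>
      have hhead : ∀ q ∈ rest, r ≤ q.1 := by
        intro q hq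
        have := (List.pairwise_cons.mp hpw).1 q hq
        unfold pvLexLe at this; omega
      have hmono : rest.Pairwise (fun a b => (a.1 == r) = false → (b.1 == r) = false) := by
        refine List.Pairwise.imp_of_mem ?_ (List.pairwise_cons.mp hpw).2
        intro a b ha hb hab
        have hra : r ≤ a.1 := hhead a ha
        unfold pvLexLe at hab
        simp only [beq_eq_false_iff_ne, ne_eq]
        intro hane; omega
      obtain ⟨htw, hdw⟩ := takeWhile_eq_filter_of_mono (fun q => q.1 == r) rest hmono
      have hsub : (rest.filter (fun q => !(q.1 == r))).Sublist rest := List.filter_sublist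
      have hrec := ih (rest.filter (fun q => !(q.1 == r)))
        (le_trans (List.Sublist.length_le hsub) (by simpa using Nat.lt_succ_iff.mp (Nat.lt_of_lt_of_le (Nat.lt_succ_of_le (le_refl _)) hl)))
        (List.Pairwise.sublist hsub (List.pairwise_cons.mp hpw).2)
      rw [groupRuns, htw, hdw, hrec]
      have hset : PySem.List.sorted (PySem.Set.ofList (((r, p) :: rest).map (fun q => q.1))) (fun x => x) false
          = r :: PySem.List.sorted (PySem.Set.ofList ((rest.filter (fun q => !(q.1 == r))).map (fun q => q.1))) (fun x => x) false := by
        rw [List.map_cons]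
        apply sorted_set_cons_min
        · intro a
          constructor
          · intro ha
            obtain ⟨q, hq, rfl⟩ := List.mem_map.mp ha
            have := List.mem_filter.mp hq
            exact ⟨List.mem_map.mpr ⟨q, this.1, rfl⟩, by simpa using this.2⟩
          · rintro ⟨ha, hane⟩
            obtain ⟨q, hq, rfl⟩ := List.mem_map.mp ha
            exact List.mem_map.mpr ⟨q, List.mem_filter.mpr ⟨hq, by simpa using hane⟩, rfl⟩
        · intro a ha
          obtain ⟨q, hq, rfl⟩ := List.mem_map.mp ha
          exact hhead q hq
      rw [hset, List.map_cons]
      congr 1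
      · -- head entry: the r-run
        congr 1
        have : (((r, p) :: rest).filter (fun q => q.1 == r)) = (r, p) :: rest.filter (fun q => q.1 == r) := by
          simp
        rw [this, List.map_cons]
      · -- tail: for r' ≠ r the filters agree
        apply List.map_congr_left
        intro a ha
        have hane : a ≠ r := by
          rw [PySem.List.mem_sorted, PySem.Set.mem_ofList] at ha
          obtain ⟨q, hq, rfl⟩ := List.mem_map.mp ha
          have := List.mem_filter.mp hq
          simpa using this.2
        have hfil : List.filter (fun q => q.1 == a) (List.filter (fun q => !(q.1 == r)) rest)
            = List.filter (fun q => q.1 == a) ((r, p) :: rest) := by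
          rw [List.filter_filter, List.filter_cons]
          rw [show ((r, p).1 == a) = false by simpa using (Ne.symm hane)]
          simp only [Bool.false_eq_true, if_false]
          apply List.filter_congr
          intro q hq
          by_cases hqa : q.1 = a
          · simp [hqa, hane]
          · simp [hqa]
        rw [hfil]


-- ---------- the two-pointer merge ----------

def lookupG (gs : List (Int × List (Int × Int))) (r : Int) : List (Int × Int) :=
  match gs.find? (fun g => g.1 == r) with
  | some g => g.2
  | none => []

theorem find?_dropWhile_lt (r r' : Int) (gs : List (Int × List (Int × Int))) (hle : r ≤ r') :
    gs.find? (fun g => g.1 == r') = (gs.dropWhile (fun g => decide (g.1 < r))).find? (fun g => g.1 == r') := by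
  conv_lhs => rw [← List.takeWhile_append_dropWhile (p := fun g => decide (g.1 < r)) (l := gs)]
  rw [List.find?_append]
  have : (gs.takeWhile (fun g => decide (g.1 < r))).find? (fun g => g.1 == r') = none := by
    rw [List.find?_eq_none]
    intro x hx
    have := List.mem_takeWhile_imp hx
    simp only [decide_eq_true_eq] at this
    simp only [beq_iff_eq]
    omega
  rw [this, Option.none_or]

theorem merge_spec :
    ∀ (R : List Int) (gs : List (Int × List (Int × Int))),
    R.Pairwise (· < ·) → (gs.map (fun g => g.1)).Pairwise (· < ·) →
    mergeRanks R gs = R.map (fun r => (r, lookupG gs r)) := by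
  intro R
  induction R with
  | nil => intro gs _ _; rfl
  | cons r rs ih =>
    intro gs hR hgs
    have hgs' : ((gs.dropWhile (fun g => decide (g.1 < r))).map (fun g => g.1)).Pairwise (· < ·) :=
      List.Pairwise.sublist ((List.dropWhile_sublist _).map _) hgs
    have hrec := ih (gs.dropWhile (fun g => decide (g.1 < r))) (List.pairwise_cons.mp hR).2 hgs'
    have htail : rs.map (fun r' => (r', lookupG (gs.dropWhile (fun g => decide (g.1 < r))) r'))
        = rs.map (fun r' => (r', lookupG gs r')) := by
      apply List.map_congr_left
      intro r' hr'
      have : r ≤ r' := le_of_lt ((List.pairwise_cons.mp hR).1 r' hr')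
      unfold lookupG
      rw [find?_dropWhile_lt r r' gs this]
    have hhead : (match gs.dropWhile (fun g => decide (g.1 < r)) with
        | g :: _ => if g.1 == r then g.2 else []
        | [] => ([] : List (Int × Int))) = lookupG gs r := by
      unfold lookupG
      rw [find?_dropWhile_lt r r gs le_rfl]
      cases hdh : gs.dropWhile (fun g => decide (g.1 < r)) with
      | nil => rfl
      | cons g t =>
        by_cases hg : g.1 = r
        · simp [hg]
        · have hgt : r < g.1 := by
            have := List.head?_dropWhile_not (fun g => decide (g.1 < r)) gs
            rw [hdh] at this
            simp only [List.head?_cons] at this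
            simp only [decide_eq_false_iff_not, not_lt] at this
            omega
          have hnone : (g :: t).find? (fun g => g.1 == r) = none := by
            rw [List.find?_eq_none]
            intro x hx
            rcases List.mem_cons.mp hx with rfl | hx
            · simp [hg]
            · have hpw := hgs'
              rw [hdh, List.map_cons, List.pairwise_cons] at hpw
              have : g.1 < x.1 := hpw.1 x.1 (List.mem_map.mpr ⟨x, hx, rfl⟩)
              simp only [beq_iff_eq]
              omega
          simp [hnone, hg]
    simp only [mergeRanks, List.map_cons]
    rw [hrec, htail, hhead]

theorem lookupG_map (e : Int → List (Int × Int)) (r : Int) :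
    ∀ (S : List Int), lookupG (S.map (fun s => (s, e s))) r = if r ∈ S then e r else [] := by
  intro S
  induction S with
  | nil => rfl
  | cons s S ih =>
    unfold lookupG at ih ⊢
    rw [List.map_cons, List.find?_cons]
    by_cases hs : s = r
    · subst hs; simp
    · simp only [show ((s, e s).1 == r) = false by simpa using hs]
      rw [ih]
      simp [Ne.symm hs]

-- ===== VERDICT (by name: the statement is the Claim_ definition above) =====
theorem mapping_key_spec : Claim_equal_mapping_key := by
  intro am rr pr _ _
  unfold Spec_mapping_key mapping_key mapping_key_alt
  simp only [PySem.List.foldl_append_singleton_eq_map, List.nil_append]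
  set pairs := am.map (fun q => (PySem.List.pyGetD rr q.1 0, PySem.List.pyGetD pr q.2 0)) with hpairs
  set sp := PySem.List.sorted2 pairs (fun q => q.1) (fun q => q.2) false with hsp
  have hspperm : sp.Perm pairs := PySem.List.sorted2_perm _ _ _ _
  have hsppw : sp.Pairwise pvLexLe := sorted2_pairwise_lex pairs
  -- rewrite B into a map over the sorted distinct reactant ranks
  have hgroup := groupRuns_sorted_eq sp.length sp le_rfl hsppw
  set S := PySem.List.sorted (PySem.Set.ofList (sp.map (fun q => q.1))) (fun x => x) false with hS
  have hSpw : S.Pairwise (· < ·) := by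
    rw [hS]; exact PySem.List.sorted_ofList_pairwise_lt _
  set E := fun r => runLen ((sp.filter (fun q => q.1 == r)).map (fun q => q.2)) with hE
  have hgs : groupRuns sp = S.map (fun s => (s, E s)) := hgroup
  have hgsfst : ((groupRuns sp).map (fun g => g.1)).Pairwise (· < ·) := by
    rw [hgs, List.map_map]
    simpa [Function.comp_def] using hSpw
  rw [merge_spec _ _ (PySem.List.sorted_ofList_pairwise_lt rr) hgsfst]
  -- now both sides are maps over sorted(set(rr)); compare entries pointwise
  apply List.map_congr_left
  intro r _
  rw [per_rank]
  rw [hgs, lookupG_map]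
  by_cases hrS : r ∈ S
  · rw [if_pos hrS]
    -- the r-run: runLen of the sorted p-ranks with r-rank r
    have hfilpw : ((sp.filter (fun q => q.1 == r)).map (fun q => q.2)).Pairwise (· ≤ ·) := by
      rw [List.pairwise_map]
      refine List.Pairwise.imp_of_mem ?_ (List.Pairwise.sublist List.filter_sublist hsppw)
      intro a b ha hb hab
      have ha' : a.1 = r := by simpa using (List.mem_filter.mp ha).2
      have hb' : b.1 = r := by simpa using (List.mem_filter.mp hb).2
      unfold pvLexLe at hab
      omega
    simp only [hE]
    rw [runLen_sorted_eq _ _ le_rfl hfilpw]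
    -- same sorted set of p-ranks, same counts
    have hpermfil : ((sp.filter (fun q => q.1 == r)).map (fun q => q.2)).Perm
        ((pairs.filter (fun q => q.1 == r)).map (fun q => q.2)) :=
      (hspperm.filter _).map _
    rw [sorted_set_perm hpermfil]
    congr 1
    apply List.map_congr_left
    intro p _
    have hc : (List.map (fun q => q.2) (List.filter (fun q => q.1 == r) sp)).count p
        = pairs.count (r, p) := by
      rw [count_filter_map]; exact hspperm.count_eq _
    rw [hc]
  · rw [if_neg hrS]
    -- r occurs in no pair: A's entry is the empty list too
    have hnf : pairs.filter (fun q => q.1 == r) = [] := by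
      rw [List.filter_eq_nil_iff]
      intro q hq hq'
      apply hrS
      rw [hS, PySem.List.mem_sorted, PySem.Set.mem_ofList]
      exact List.mem_map.mpr ⟨q, hspperm.mem_iff.mpr hq, by simpa using hq'⟩
    rw [hnf]
    simp [PySem.List.sorted_eq_nil_iff]
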